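-- pv_equiv track=rewrite | github.com/jwen2/TextMining | TextMiningV2.py | cleanuplist
-- ===== SOURCE A (Python) =====
-- def cleanuplist(textlist):
--     """ takes a text as a string and returns a list of words
--         without any of the symbols and lowercased
--
--     >>> cleanuplist('This project is so hard!')
--     ['this', 'project', 'is', 'so', 'hard']
--     >>> cleanuplist('I need, a bunch, of !? doctest?')
--     ['i', 'need', 'a', 'bunch', 'of', 'doctest']
--
--     Functionality: iteratively go through the words in the list and if they are in the symbols
--     it would replace the symbol with a space
--     """
--     cleanedlist = []
--     textlist = textlist.lower().split()
--     for word in textlist: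
--         symbols = "-_=+[}{]:;?/.>,<?!@#$%^&*()|'"
--         for i in range (0,len(symbols)):
--             word = word.replace(symbols[i], '')
--         if len(word) > 0:
--             cleanedlist.append(word)
--     return cleanedlist
-- ===== SOURCE B (Python) =====
-- SYMBOLS = set("-_=+[}{]:;?/.>,<?!@#$%^&*()|'")
--
-- def cleanuplist(textlist):
--     cleaned = [''.join(c for c in w if c not in SYMBOLS) for w in textlist.lower().split()]
--     return [w for w in cleaned if w]
-- ===== Notes on version B (the rewrite author's own statement) =====
-- stated objective: idiomatic
-- what changed: The inner loop running str.replace once per symbol (29 full scans of each word) is replaced by a single character-filtering pass per word against a symbol set, with the map-then-filter pipeline replacing the accumulator loop.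
import Mathlib
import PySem

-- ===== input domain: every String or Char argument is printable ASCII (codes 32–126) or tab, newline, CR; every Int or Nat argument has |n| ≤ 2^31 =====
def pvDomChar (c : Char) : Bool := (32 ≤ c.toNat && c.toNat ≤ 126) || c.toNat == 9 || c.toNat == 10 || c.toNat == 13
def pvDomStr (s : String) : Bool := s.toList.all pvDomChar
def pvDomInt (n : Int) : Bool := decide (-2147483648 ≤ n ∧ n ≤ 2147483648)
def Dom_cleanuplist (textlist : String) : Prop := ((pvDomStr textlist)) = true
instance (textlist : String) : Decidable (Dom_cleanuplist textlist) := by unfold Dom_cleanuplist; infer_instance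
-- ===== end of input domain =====

-- B replaces A's per-symbol str.replace loop (29 scans per word) by one character-filtering
-- pass per word against a symbol set, and the accumulator loop by a map-then-filter pipeline.

-- ===== PORT A =====
-- the symbols string A defines inside its loop
def pvSymbolsA : List Char := "-_=+[}{]:;?/.>,<?!@#$%^&*()|'".toList

def cleanuplist (textlist : String) : List String :=
  let words := PySem.Chars.split₀ (PySem.Chars.lower textlist.toList)
  (words.foldl (fun acc word =>
      let word := pvSymbolsA.foldl (fun w c => PySem.Chars.replace w [c] []) word
      if word.length > 0 then acc ++ [word] else acc) []).map String.ofList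

-- ===== PORT B =====
-- SYMBOLS = set("...")
def pvSymSet : PySem.Set Char := PySem.Set.ofList "-_=+[}{]:;?/.>,<?!@#$%^&*()|'".toList

def cleanuplist_alt (textlist : String) : List String :=
  let cleaned := (PySem.Chars.split₀ (PySem.Chars.lower textlist.toList)).map
      (fun w => w.filter (fun c => !(PySem.Set.contains pvSymSet c)))
  ((cleaned.filter (fun w => !w.isEmpty)).map String.ofList)

-- ===== PRECONDITION & SPEC =====
def Spec_cleanuplist (textlist : String) (out : List String) : Prop := out = cleanuplist_alt textlist
instance (textlist : String) (out : List String) : Decidable (Spec_cleanuplist textlist out) := by unfold Spec_cleanuplist; infer_instance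

-- ===== CLAIM (what is proved, stated in full; the proofs are below) =====
def Claim_equal_cleanuplist : Prop := ∀ (textlist : String), Dom_cleanuplist textlist → Spec_cleanuplist textlist (cleanuplist textlist)

-- ===== LEMMAS AND PROOFS =====

-- one str.replace of a single character by '' removes exactly that character
lemma go_single (a : Char) : ∀ (l : List Char) (fuel : Nat) (acc : List Char), l.length ≤ fuel →
    PySem.Chars.replace.go [a] [] fuel l acc = acc.reverse ++ l.filter (fun c => !(c == a)) := by
  intro l
  induction l with
  | nil =>
      intro fuel acc _
      cases fuel <;> simp [PySem.Chars.replace.go]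
  | cons c t ih =>
      intro fuel acc hle
      cases fuel with
      | zero => simp at hle
      | succ n =>
          by_cases h : a = c
          · subst h
            simp [PySem.Chars.replace.go, List.isPrefixOf, ih n acc (by simpa using hle)]
          · have hne : (a == c) = false := by simp [h]
            simp [PySem.Chars.replace.go, List.isPrefixOf, hne,
                  ih n (c :: acc) (by simpa using hle), Ne.symm h]

lemma replace_single (cs : List Char) (a : Char) :
    PySem.Chars.replace cs [a] [] = cs.filter (fun c => !(c == a)) := by
  simpa [PySem.Chars.replace] using go_single a cs cs.length [] le_rfl

-- A's whole symbol loop over a word is one filter against the symbol list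
lemma clean_foldl (syms : List Char) : ∀ (w : List Char),
    syms.foldl (fun s a => PySem.Chars.replace s [a] []) w
      = w.filter (fun c => !(syms.contains c)) := by
  induction syms with
  | nil => intro w; simp
  | cons a rest ih =>
      intro w
      simp only [replace_single] at ih
      simp only [List.foldl_cons, replace_single]
      rw [ih, List.filter_filter]
      apply List.filter_congr
      intro c _
      by_cases h : c = a <;> simp [h]

-- membership in B's set agrees with membership in A's symbol list
lemma symset_contains (c : Char) :
    PySem.Set.contains pvSymSet c = pvSymbolsA.contains c := by
  simp only [pvSymSet, pvSymbolsA, PySem.Set.contains_eq_listContains,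
    List.contains_eq_mem, PySem.Set.mem_ofList]

-- A's accumulator loop 'if len(word)>0: out.append(word)' over already-cleaned words, as filter-then-map
lemma foldl_append_if_pos {α : Type} (f : α → List Char) (l : List α) (acc : List (List Char)) :
    l.foldl (fun acc x => if (f x).length > 0 then acc ++ [f x] else acc) acc
      = acc ++ (l.filter (fun x => decide ((f x).length > 0))).map f := by
  induction l generalizing acc with
  | nil => simp
  | cons x t ih => by_cases h : (f x).length > 0 <;> simp [h, ih]

-- ===== VERDICT (by name: the statement is the Claim_ definition above) =====
theorem cleanuplist_spec : Claim_equal_cleanuplist := by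
  intro textlist _
  unfold Spec_cleanuplist cleanuplist cleanuplist_alt
  simp only [clean_foldl, symset_contains, List.filter_map]
  rw [foldl_append_if_pos]
  simp only [List.nil_append]
  have hflt : List.filter
        (fun x => decide (0 < (List.filter (fun c => !(pvSymbolsA.contains c)) x).length))
        (PySem.Chars.split₀ (PySem.Chars.lower textlist.toList))
      = List.filter ((fun w => !w.isEmpty) ∘ fun w => List.filter (fun c => !(pvSymbolsA.contains c)) w)
        (PySem.Chars.split₀ (PySem.Chars.lower textlist.toList)) := by
    apply List.filter_congr
    intro w _
    simp only [Function.comp_apply]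
    rcases h : w.filter (fun c => !(pvSymbolsA.contains c)) with _ | ⟨c, t⟩ <;> simp
  rw [hflt]
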